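-- pv_equiv track=rewrite | github.com/adamradek-git/Opentrons-Protocols-ICFO | Pump System/backend.py | modifier
-- ===== SOURCE A (Python) =====
-- def modifier(command):
--     for i in range(1, len(command)):
--         if command[i] == 'E8':
--             command.insert(i+1, '00')
--         if command[i] == 'E9':
--             command[i] = 'E8'
--             command.insert(i+1, '01')
--     return command
-- ===== SOURCE B (Python) =====
-- def modifier(command):
--     # Single pass: expand every E8 marker to E8,00 and rewrite every E9 to E8,01.
--     # (Builds a new list; the return value is what matters, the input is not mutated.)
--     out = command[:1]
--     for c in command[1:]:
--         if c == 'E8':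
--             out += ['E8', '00']
--         elif c == 'E9':
--             out += ['E8', '01']
--         else:
--             out.append(c)
--     return out
-- ===== Notes on version B (the rewrite author's own statement) =====
-- stated objective: simpler
-- what changed: A walks index 1..len-1 of the list it is mutating, calling list.insert after each marker; B is one plain pass over the original elements that appends the expansion of each marker to a fresh list.
-- intended difference: On lists where some 'E8'/'E9' marker at index j >= 1 has j plus the number of earlier markers >= len(command), A's loop bound (frozen before the insertions grew the list) stops before reaching that marker and returns it unexpanded, while B expands every marker, which is the evident intent of the function. — e.g. on modifier(["X", "E8", "E9"]): A returns ["X", "E8", "00", "E9"], B returns ["X", "E8", "00", "E8", "01"]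
import Mathlib
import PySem

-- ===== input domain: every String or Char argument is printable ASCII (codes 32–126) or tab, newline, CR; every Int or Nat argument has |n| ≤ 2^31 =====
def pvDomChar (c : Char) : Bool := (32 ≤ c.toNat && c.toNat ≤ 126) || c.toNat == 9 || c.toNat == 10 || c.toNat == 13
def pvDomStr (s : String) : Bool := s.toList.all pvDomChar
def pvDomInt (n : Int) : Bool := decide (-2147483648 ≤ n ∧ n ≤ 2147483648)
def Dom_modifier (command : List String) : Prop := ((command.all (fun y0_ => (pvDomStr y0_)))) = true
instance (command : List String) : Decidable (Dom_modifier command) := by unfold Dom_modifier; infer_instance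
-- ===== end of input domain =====

-- B replaces A's in-place insert loop (frozen iteration count) by one pass expanding every
-- marker; equivalence is about the RETURN value only (A mutates its argument, B does not).

-- ===== PORT A =====
-- second if of the loop body ("if command[i] == 'E9': …"), applied to the list after the first if
def modifierSnd (cmd : List String) (i : Int) : List String :=
  if PySem.List.pyGetD cmd i "" = "E9" then
    PySem.List.insert (PySem.List.pySetD cmd i "E8") (i + 1) "01"
  else cmd

-- one iteration of A's for-loop body (index i over the evolving list; reads never go out of range)
def modifierStep (cmd : List String) (i : Int) : List String :=
  modifierSnd (if PySem.List.pyGetD cmd i "" = "E8" then PySem.List.insert cmd (i + 1) "00" else cmd) i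

def modifier (command : List String) : List String :=
  (PySem.List.pyRange 1 (command.length : Int)).foldl modifierStep command

-- ===== PORT B =====
-- B's for-loop body: append the expansion of one element to the output list
def modifierAltStep (out : List String) (c : String) : List String :=
  if c = "E8" then out ++ ["E8", "00"]
  else if c = "E9" then out ++ ["E8", "01"]
  else out ++ [c]

def modifier_alt (command : List String) : List String :=
  (command.drop 1).foldl modifierAltStep (command.take 1)

-- ===== PRECONDITION & SPEC =====
-- On lists where some 'E8'/'E9' marker at index j ≥ 1 has j + (number of earlier markers) ≥
-- len(command), A's loop bound (frozen before the insertions grew the list) stops before that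
-- marker and returns it unexpanded, while B expands every marker — the evident intent.
-- dCheck j m n r: scanning r (whose head sits at index j, with m markers seen so far),
-- is there a marker whose shifted position j + m reaches the frozen bound n?
def dCheck (j m n : Nat) : List String → Bool
  | [] => false
  | c :: r =>
    if c = "E8" ∨ c = "E9" then (decide (n ≤ j + m) || dCheck (j + 1) (m + 1) n r)
    else dCheck (j + 1) m n r

def D_modifier (command : List String) : Prop :=
  dCheck 1 0 command.length command.tail = true
instance (command : List String) : Decidable (D_modifier command) := by
  unfold D_modifier; infer_instance

def Spec_modifier (command : List String) (out : List String) : Prop :=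
  ¬ D_modifier command → out = modifier_alt command
instance (command : List String) (out : List String) : Decidable (Spec_modifier command out) := by
  unfold Spec_modifier; infer_instance

def pvDiffWitness_modifier : List String := ["X", "E8", "E9"]
def pvDiffWitnessOut_modifier : (List String) × (List String) :=
  (["X", "E8", "00", "E9"], ["X", "E8", "00", "E8", "01"])

-- ===== CLAIM (what is proved, stated in full; the proofs are below) =====
def Claim_unchanged_modifier : Prop :=
  ∀ (command : List String), Dom_modifier command → Spec_modifier command (modifier command)
def Claim_changed_modifier : Prop :=
  Dom_modifier (pvDiffWitness_modifier) ∧ D_modifier (pvDiffWitness_modifier) ∧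
  modifier (pvDiffWitness_modifier) = pvDiffWitnessOut_modifier.1 ∧
  modifier_alt (pvDiffWitness_modifier) = pvDiffWitnessOut_modifier.2 ∧
  pvDiffWitnessOut_modifier.1 ≠ pvDiffWitnessOut_modifier.2
def Claim_exact_modifier : Prop :=
  ∀ (command : List String), Dom_modifier command → D_modifier command →
    modifier command ≠ modifier_alt command

-- ===== LEMMAS AND PROOFS =====

-- structural form of B's pass: expand every element
def expand : List String → List String
  | [] => []
  | c :: r =>
    if c = "E8" then "E8" :: "00" :: expand r
    else if c = "E9" then "E8" :: "01" :: expand r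
    else c :: expand r

lemma foldl_altStep (R : List String) : ∀ (acc : List String),
    R.foldl modifierAltStep acc = acc ++ expand R := by
  induction R with
  | nil => intro acc; simp [expand]
  | cons c r ih =>
      intro acc
      simp only [List.foldl_cons, ih, modifierAltStep, expand]
      split_ifs <;> simp

lemma modifier_alt_cons (c : String) (rest : List String) :
    modifier_alt (c :: rest) = c :: expand rest := by
  simp [modifier_alt, foldl_altStep]

-- budget-counter form of A's loop result (proved equal to A's fold below in fold_inv)
def modifierAux (b : Int) : List String → List String
  | [] => []
  | c :: rest =>
    if b ≤ 0 then c :: rest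
    else if c = "E8" then "E8" :: "00" :: modifierAux (b - 2) rest
    else if c = "E9" then "E8" :: "01" :: modifierAux (b - 2) rest
    else c :: modifierAux (b - 1) rest

lemma pyRange_nil_of_le {a b : Int} (h : b ≤ a) : PySem.List.pyRange a b = [] := by
  simp [PySem.List.pyRange_one, Int.toNat_of_nonpos (by omega : b - a ≤ 0)]

lemma getD_mid (P rest : List String) (c d : String) :
    PySem.List.pyGetD (P ++ c :: rest) ((P.length : Nat) : Int) d = c := by
  rw [PySem.List.pyGetD_natCast]
  simp [List.getD]

lemma insert_mid (P rest : List String) (c v : String) :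
    PySem.List.insert (P ++ c :: rest) (((P.length : Nat) : Int) + 1) v
      = P ++ c :: v :: rest := by
  have h : ((P.length : Nat) : Int) + 1 = ((P.length + 1 : Nat) : Int) := by push_cast; ring
  rw [h, PySem.List.insert_natCast _ _ _ (by simp)]
  have ht : List.take (P.length + 1) (P ++ c :: rest) = P ++ [c] := by
    simp [List.take_append]
  have hd : List.drop (P.length + 1) (P ++ c :: rest) = rest := by
    simp [List.drop_append]
  rw [ht, hd]; simp

lemma set_mid (P rest : List String) (c v : String) :
    PySem.List.pySetD (P ++ c :: rest) ((P.length : Nat) : Int) v = P ++ v :: rest := by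
  rw [PySem.List.pySetD_natCast]
  simp

-- A's loop body at an index holding an element other than 'E8'/'E9' leaves the list unchanged
lemma stepA_plain (P rest : List String) (c : String) (h8 : c ≠ "E8") (h9 : c ≠ "E9") :
    modifierStep (P ++ c :: rest) ((P.length : Nat) : Int) = P ++ c :: rest := by
  unfold modifierStep modifierSnd
  rw [getD_mid, if_neg h8, getD_mid, if_neg h9]

lemma stepA_E8 (P rest : List String) :
    modifierStep (P ++ "E8" :: rest) ((P.length : Nat) : Int) = (P ++ ["E8"]) ++ "00" :: rest := by
  unfold modifierStep modifierSnd
  rw [getD_mid, if_pos rfl, insert_mid, getD_mid,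
    if_neg (by decide : ¬ ("E8" : String) = "E9")]
  simp

lemma stepA_E9 (P rest : List String) :
    modifierStep (P ++ "E9" :: rest) ((P.length : Nat) : Int) = (P ++ ["E8"]) ++ "01" :: rest := by
  unfold modifierStep modifierSnd
  rw [getD_mid, if_neg (by decide : ¬ ("E9" : String) = "E8"), getD_mid, if_pos rfl,
    set_mid, insert_mid]
  simp

lemma modifierAux_nonpos {b : Int} (R : List String) (hb : b ≤ 0) : modifierAux b R = R := by
  cases R <;> simp [modifierAux, hb]

-- main invariant: A's remaining fold over indices P.length .. n-1, started on P ++ R,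
-- equals P ++ (the budget loop on R with budget n - P.length), provided the budget is at most |R|
lemma fold_inv (n : Int) : ∀ (R P : List String), n - (P.length : Int) ≤ (R.length : Int) →
    (PySem.List.pyRange ((P.length : Nat) : Int) n).foldl modifierStep (P ++ R)
      = P ++ modifierAux (n - (P.length : Int)) R := by
  intro R
  induction R with
  | nil =>
      intro P h
      simp at h
      rw [pyRange_nil_of_le (by omega)]
      simp [modifierAux]
  | cons c rest ih =>
      intro P h
      by_cases hn : n ≤ (P.length : Int)
      · rw [pyRange_nil_of_le hn, modifierAux_nonpos _ (by omega)]
        simp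
      · rw [not_le] at hn
        rw [PySem.List.pyRange_one_cons hn, List.foldl_cons]
        have hb : ¬ (n - (P.length : Int) ≤ 0) := by omega
        by_cases h8 : c = "E8"
        · subst h8
          rw [stepA_E8]
          by_cases hlast : n ≤ (P.length : Int) + 1
          · rw [pyRange_nil_of_le (by omega)]
            simp only [List.foldl_nil, modifierAux, if_neg hb]
            rw [modifierAux_nonpos _ (by omega : n - (P.length : Int) - 2 ≤ 0)]
            simp
          · rw [not_le] at hlast
            have hl1 : ((P.length : Nat) : Int) + 1 = (((P ++ ["E8"]).length : Nat) : Int) := by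
              simp
            have hl2 : (((P ++ ["E8"]).length : Nat) : Int) + 1
                = (((P ++ ["E8", "00"]).length : Nat) : Int) := by simp; omega
            rw [hl1, PySem.List.pyRange_one_cons (by simp at hl1 ⊢; omega), List.foldl_cons,
              stepA_plain _ _ _ (by decide) (by decide),
              (by simp : (P ++ ["E8"]) ++ ("00" : String) :: rest = (P ++ ["E8", "00"]) ++ rest),
              hl2, ih (P ++ ["E8", "00"]) (by simp at h ⊢; omega)]
            simp only [modifierAux, if_neg hb]
            have : n - (((P ++ ["E8", "00"]).length : Nat) : Int) = n - (P.length : Int) - 2 := by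
              simp; ring
            rw [this]; simp
        · by_cases h9 : c = "E9"
          · subst h9
            rw [stepA_E9]
            by_cases hlast : n ≤ (P.length : Int) + 1
            · rw [pyRange_nil_of_le (by omega)]
              simp only [List.foldl_nil, modifierAux, if_neg hb]
              rw [modifierAux_nonpos _ (by omega : n - (P.length : Int) - 2 ≤ 0)]
              simp
            · rw [not_le] at hlast
              have hl1 : ((P.length : Nat) : Int) + 1 = (((P ++ ["E8"]).length : Nat) : Int) := by
                simp
              have hl2 : (((P ++ ["E8"]).length : Nat) : Int) + 1
                  = (((P ++ ["E8", "01"]).length : Nat) : Int) := by simp; omega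
              rw [hl1, PySem.List.pyRange_one_cons (by simp at hl1 ⊢; omega), List.foldl_cons,
                stepA_plain _ _ _ (by decide) (by decide),
                (by simp : (P ++ ["E8"]) ++ ("01" : String) :: rest = (P ++ ["E8", "01"]) ++ rest),
                hl2, ih (P ++ ["E8", "01"]) (by simp at h ⊢; omega)]
              simp only [modifierAux, if_neg hb]
              have : n - (((P ++ ["E8", "01"]).length : Nat) : Int) = n - (P.length : Int) - 2 := by
                simp; ring
              rw [this]; simp [h8]
          · rw [stepA_plain _ _ _ h8 h9,
              (by simp : P ++ c :: rest = (P ++ [c]) ++ rest),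
              (by simp : ((P.length : Nat) : Int) + 1 = (((P ++ [c]).length : Nat) : Int)),
              ih (P ++ [c]) (by simp at h ⊢; omega)]
            simp only [modifierAux, if_neg hb, if_neg h8, if_neg h9]
            have : n - (((P ++ [c]).length : Nat) : Int) = n - (P.length : Int) - 1 := by
              simp; ring
            rw [this]; simp

lemma modifier_cons (c : String) (rest : List String) :
    modifier (c :: rest) = c :: modifierAux (rest.length : Int) rest := by
  unfold modifier
  have h := fold_inv ((rest.length : Int) + 1) rest [c] (by simp)
  simp only [List.length_singleton, Nat.cast_one, List.singleton_append,
    add_sub_cancel_right] at h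
  simp only [List.length_cons]
  push_cast
  exact h

-- once the frozen bound is reached, dCheck = false means the rest is marker-free
lemma noMarker_of_dCheck_false : ∀ (r : List String) (j m n : Nat), n ≤ j + m →
    dCheck j m n r = false → expand r = r := by
  intro r
  induction r with
  | nil => intro j m n _ _; simp [expand]
  | cons c rest ih =>
      intro j m n hn hd
      simp only [dCheck] at hd
      by_cases hc : c = "E8" ∨ c = "E9"
      · rw [if_pos hc] at hd
        simp [decide_eq_true (by omega : n ≤ j + m)] at hd
      · rw [if_neg hc] at hd
        push_neg at hc
        simp only [expand, if_neg hc.1, if_neg hc.2]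
        rw [ih (j + 1) m n (by omega) hd]

-- no truncation (dCheck false) ⇒ the budget loop is the full expansion
lemma aux_eq_expand : ∀ (r : List String) (j m n : Nat),
    dCheck j m n r = false →
    modifierAux ((n : Int) - j - m) r = expand r := by
  intro r
  induction r with
  | nil => intro j m n _; simp [modifierAux, expand]
  | cons c rest ih =>
      intro j m n hd
      simp only [dCheck] at hd
      by_cases hc : c = "E8" ∨ c = "E9"
      · rw [if_pos hc] at hd
        simp only [Bool.or_eq_false_iff, decide_eq_false_iff_not, not_le] at hd
        obtain ⟨hjm, hrec⟩ := hd
        have hb : ¬ ((n : Int) - j - m ≤ 0) := by push_cast; omega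
        have hstep : (n : Int) - j - m - 2 = (n : Int) - (j + 1) - (m + 1) := by push_cast; ring
        have h := ih (j + 1) (m + 1) n hrec
        push_cast at h
        rcases hc with h8 | h9
        · subst h8
          simp only [modifierAux, if_neg hb, expand]
          rw [hstep, h]
          simp
        · subst h9
          simp only [modifierAux, if_neg hb, expand]
          rw [hstep, h]
          simp
      · rw [if_neg hc] at hd
        push_neg at hc
        simp only [modifierAux, expand, if_neg hc.1, if_neg hc.2]
        by_cases hb : (n : Int) - j - m ≤ 0
        · rw [if_pos hb, noMarker_of_dCheck_false rest (j + 1) m n (by push_cast at hb; omega) hd]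
        · rw [if_neg hb]
          have hstep : (n : Int) - j - m - 1 = (n : Int) - (j + 1) - m := by push_cast; ring
          have h := ih (j + 1) m n hd
          push_cast at h
          rw [hstep, h]

lemma len_expand_ge (r : List String) : r.length ≤ (expand r).length := by
  induction r with
  | nil => simp [expand]
  | cons c rest ih =>
      simp only [expand]
      split_ifs <;> simp <;> omega

-- dCheck true ⇒ some marker remains ⇒ the expansion is strictly longer
lemma len_expand_gt_of_dCheck : ∀ (r : List String) (j m n : Nat),
    dCheck j m n r = true → r.length < (expand r).length := by
  intro r
  induction r with
  | nil => intro j m n h; simp [dCheck] at h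
  | cons c rest ih =>
      intro j m n hd
      simp only [dCheck] at hd
      by_cases hc : c = "E8" ∨ c = "E9"
      · have hl := len_expand_ge rest
        rcases hc with h8 | h9
        · subst h8; simp [expand]; omega
        · subst h9
          simp only [expand, if_neg (by decide : ¬ ("E9" : String) = "E8"), if_pos rfl]
          simp; omega
      · rw [if_neg hc] at hd
        push_neg at hc
        simp only [expand, if_neg hc.1, if_neg hc.2, List.length_cons]
        have := ih (j + 1) m n hd
        omega

-- truncation (dCheck true) ⇒ the budget loop is strictly shorter than the full expansion
lemma len_aux_lt_of_dCheck : ∀ (r : List String) (j m n : Nat),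
    dCheck j m n r = true →
    (modifierAux ((n : Int) - j - m) r).length < (expand r).length := by
  intro r
  induction r with
  | nil => intro j m n h; simp [dCheck] at h
  | cons c rest ih =>
      intro j m n hd
      simp only [dCheck] at hd
      by_cases hb : (n : Int) - j - m ≤ 0
      · rw [modifierAux_nonpos _ hb]
        exact len_expand_gt_of_dCheck (c :: rest) j m n hd
      · by_cases hc : c = "E8" ∨ c = "E9"
        · rw [if_pos hc] at hd
          have hjm : ¬ (n ≤ j + m) := by push_cast at hb; omega
          rw [Bool.or_eq_true, decide_eq_true_eq] at hd
          have hrec : dCheck (j + 1) (m + 1) n rest = true := by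
            rcases hd with h | h
            · omega
            · exact h
          have hstep : (n : Int) - j - m - 2 = (n : Int) - (j + 1) - (m + 1) := by
            push_cast; ring
          have h := ih (j + 1) (m + 1) n hrec
          push_cast at h
          rcases hc with h8 | h9
          · subst h8
            simp only [modifierAux, if_neg hb, expand]
            rw [hstep]
            simp at h ⊢
            omega
          · subst h9
            simp only [modifierAux, if_neg hb, expand]
            rw [hstep]
            simp at h ⊢
            omega
        · rw [if_neg hc] at hd
          push_neg at hc
          simp only [modifierAux, if_neg hb, if_neg hc.1, if_neg hc.2, expand, List.length_cons]
          have hstep : (n : Int) - j - m - 1 = (n : Int) - (j + 1) - m := by push_cast; ring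
          have h := ih (j + 1) m n hd
          push_cast at h
          rw [hstep]; omega

-- ===== VERDICT (by name: the statements are the Claim_ definitions above) =====
theorem modifier_spec : Claim_unchanged_modifier := by
  intro command _ hD
  match command with
  | [] => simp [modifier, modifier_alt, PySem.List.pyRange]
  | c :: rest =>
      rw [modifier_cons, modifier_alt_cons]
      unfold D_modifier at hD
      simp only [List.tail_cons, List.length_cons, Bool.not_eq_true] at hD
      have h := aux_eq_expand rest 1 0 (rest.length + 1) hD
      simp only [Nat.cast_add, Nat.cast_one, Nat.cast_zero] at h
      rw [(by push_cast; ring : (rest.length : Int) = ((rest.length : Nat) + 1 : Int) - 1 - 0), h]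

theorem modifier_changed : Claim_changed_modifier := by
  unfold Claim_changed_modifier; decide

theorem modifier_tight : Claim_exact_modifier := by
  intro command _ hD
  match command with
  | [] => simp [D_modifier, dCheck] at hD
  | c :: rest =>
      rw [modifier_cons, modifier_alt_cons]
      unfold D_modifier at hD
      simp only [List.tail_cons, List.length_cons] at hD
      have h := len_aux_lt_of_dCheck rest 1 0 (rest.length + 1) hD
      simp only [Nat.cast_add, Nat.cast_one, Nat.cast_zero] at h
      rw [(by push_cast; ring : ((rest.length : Nat) + 1 : Int) - 1 - 0 = (rest.length : Int))] at h
      intro heq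
      have := congrArg List.length heq
      simp only [List.length_cons] at this
      omega
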